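-- pv_equiv track=rewrite | github.com/disiniruhansa/mark_ditector | passfail.py | progression_outcome
-- ===== SOURCE A (Python) =====
-- def progression_outcome(credit_volume):
--     #Definning all the data using list
--     progress = [(120, 0, 0)]
--
--     module_trailer = [(100, 20, 0), (100, 0, 20)]
--
--     module_retriever = [(80,40,0),(80,20,20),(80,0,40),(60,60,0),(60,40,20),
--                     (60,20,40),(60,0,60),(40,80,0),(40,60,20),(40,40,40),
--                     (40,20,60),(20,100,0),(20,80,20),(20,60,40),(20,40,60),
--                     (0,120,0),(0,100,20),(0,80,40),(0,60,60)]
--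
--     exclude = [(40,0,80),(20,20,80),(20,0,100),(0,40,80),(0,20,100),(0,0,120)]
--
--     #Recognizing the right progression outcome for inputs
--     if credit_volume[0] == progress[0]:
--         return "Progress"
--
--     for item in module_trailer:
--         if item == credit_volume[0]:
--             return "Progress (Module trailer)"
--
--     for item in module_retriever:
--         if item == credit_volume[0]:
--             return "Module retriever"
--
--     for item in exclude:
--         if item == credit_volume[0]:
--             return "Excluded"
--
--     return "Unknown outcome"
-- ===== SOURCE B (Python) =====
-- def progression_outcome(credit_volume):
--     p, d, f = credit_volume[0]
--     # A valid credit split is three nonnegative multiples of 20 summing to 120;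
--     # the outcome then depends only on the pass and fail volumes.
--     if any(x < 0 or x % 20 != 0 for x in (p, d, f)) or p + d + f != 120:
--         return "Unknown outcome"
--     if p == 120:
--         return "Progress"
--     if p == 100:
--         return "Progress (Module trailer)"
--     if f >= 80:
--         return "Excluded"
--     return "Module retriever"
-- ===== Notes on version B (the rewrite author's own statement) =====
-- stated objective: alternative
-- what changed: Replaces the four hard-coded tuple tables and their sequential scans with an arithmetic classification: the tuples are exactly the nonnegative multiples of 20 summing to 120, and the outcome is decided from the pass and fail volumes (p==120 Progress, p==100 trailer, f>=80 Excluded, else retriever), anything else Unknown.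
import Mathlib
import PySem

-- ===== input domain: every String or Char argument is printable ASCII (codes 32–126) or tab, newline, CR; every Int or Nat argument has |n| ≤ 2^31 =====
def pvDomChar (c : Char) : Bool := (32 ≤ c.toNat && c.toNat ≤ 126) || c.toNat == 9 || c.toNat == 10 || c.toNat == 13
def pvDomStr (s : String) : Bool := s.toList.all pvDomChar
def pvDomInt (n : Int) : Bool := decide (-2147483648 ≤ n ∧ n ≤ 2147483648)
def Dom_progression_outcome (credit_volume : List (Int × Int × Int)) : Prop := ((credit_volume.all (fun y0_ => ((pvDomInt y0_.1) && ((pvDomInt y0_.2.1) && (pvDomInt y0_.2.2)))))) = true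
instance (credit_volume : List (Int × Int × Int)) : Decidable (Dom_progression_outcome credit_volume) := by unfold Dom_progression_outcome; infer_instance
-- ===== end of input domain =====

-- B replaces A's hard-coded tuple tables and scans by an arithmetic classification of the credit split (alternative algorithm).


-- ===== PORT A =====
-- 'for item in items: if item == cv: return s' — scan returning whether some item equals cv
def pvScanA (items : List (Int × Int × Int)) (cv : Int × Int × Int) : Bool :=
  match items with
  | [] => false
  | item :: rest => if item == cv then true else pvScanA rest cv

def pvModuleTrailerA : List (Int × Int × Int) := [(100, 20, 0), (100, 0, 20)]

def pvModuleRetrieverA : List (Int × Int × Int) :=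
  [(80,40,0),(80,20,20),(80,0,40),(60,60,0),(60,40,20),
   (60,20,40),(60,0,60),(40,80,0),(40,60,20),(40,40,40),
   (40,20,60),(20,100,0),(20,80,20),(20,60,40),(20,40,60),
   (0,120,0),(0,100,20),(0,80,40),(0,60,60)]

def pvExcludeA : List (Int × Int × Int) := [(40,0,80),(20,20,80),(20,0,100),(0,40,80),(0,20,100),(0,0,120)]

def progression_outcome (credit_volume : List (Int × Int × Int)) : String :=
  match PySem.List.pyGet? credit_volume 0 with
  | none => ""  -- IndexError; excluded by Pre_
  | some cv =>
    if cv == (120, 0, 0) then "Progress"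
    else if pvScanA pvModuleTrailerA cv then "Progress (Module trailer)"
    else if pvScanA pvModuleRetrieverA cv then "Module retriever"
    else if pvScanA pvExcludeA cv then "Excluded"
    else "Unknown outcome"

-- ===== PORT B =====
-- a valid credit split: three nonnegative multiples of 20 summing to 120
def pvValidB (p d f : Int) : Bool :=
  !((p < 0 || p % 20 != 0) || (d < 0 || d % 20 != 0) || (f < 0 || f % 20 != 0)) && (p + d + f == 120)

def progression_outcome_alt (credit_volume : List (Int × Int × Int)) : String :=
  match PySem.List.pyGet? credit_volume 0 with
  | none => ""  -- IndexError; excluded by Pre_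
  | some (p, d, f) =>
    if !pvValidB p d f then "Unknown outcome"
    else if p == 120 then "Progress"
    else if p == 100 then "Progress (Module trailer)"
    else if f ≥ 80 then "Excluded"
    else "Module retriever"

-- ===== PRECONDITION & SPEC =====
-- A raises IndexError on the empty list (credit_volume[0]); Pre_ excludes exactly that.
def Pre_progression_outcome (credit_volume : List (Int × Int × Int)) : Prop := credit_volume ≠ []
instance (credit_volume : List (Int × Int × Int)) : Decidable (Pre_progression_outcome credit_volume) := by unfold Pre_progression_outcome; infer_instance
def pvWitness_progression_outcome : (List (Int × Int × Int)) := [(120, 0, 0)]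

def Spec_progression_outcome (credit_volume : List (Int × Int × Int)) (out : String) : Prop := out = progression_outcome_alt credit_volume
instance (credit_volume : List (Int × Int × Int)) (out : String) : Decidable (Spec_progression_outcome credit_volume out) := by unfold Spec_progression_outcome; infer_instance

-- ===== CLAIM (what is proved, stated in full; the proofs are below) =====
def Claim_equal_progression_outcome : Prop := ∀ (credit_volume : List (Int × Int × Int)), Dom_progression_outcome credit_volume → Pre_progression_outcome credit_volume → Spec_progression_outcome credit_volume (progression_outcome credit_volume)

-- ===== LEMMAS AND PROOFS =====
set_option maxHeartbeats 1000000
theorem pvScanA_eq_mem (items : List (Int × Int × Int)) (cv : Int × Int × Int) :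
    pvScanA items cv = true ↔ cv ∈ items := by
  induction items with
  | nil => simp [pvScanA]
  | cons i t ih =>
    by_cases h : i = cv
    · simp [pvScanA, h]
    · simp [pvScanA, h, ih, Ne.symm h]

-- every tuple in A's tables is a valid credit split
theorem pvTables_valid (cv : Int × Int × Int)
    (h : cv = (120,0,0) ∨ cv ∈ pvModuleTrailerA ∨ cv ∈ pvModuleRetrieverA ∨ cv ∈ pvExcludeA) :
    pvValidB cv.1 cv.2.1 cv.2.2 = true := by
  rcases h with h | h | h | h
  · subst h; decide
  all_goals (fin_cases h <;> decide)

-- the heart: for any head tuple, A's scan chain equals B's arithmetic classification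
theorem pvCore_eq (p d f : Int) :
    (if (p, d, f) == ((120 : Int), (0 : Int), (0 : Int)) then "Progress"
     else if pvScanA pvModuleTrailerA (p, d, f) then "Progress (Module trailer)"
     else if pvScanA pvModuleRetrieverA (p, d, f) then "Module retriever"
     else if pvScanA pvExcludeA (p, d, f) then "Excluded"
     else "Unknown outcome")
    = (if !pvValidB p d f then "Unknown outcome"
       else if p == 120 then "Progress"
       else if p == 100 then "Progress (Module trailer)"
       else if f ≥ 80 then "Excluded"
       else "Module retriever") := by
  by_cases hv : pvValidB p d f = true
  · -- valid: p, d, f are nonneg multiples of 20 summing to 120; enumerate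
    have hv' := hv
    unfold pvValidB at hv'
    simp only [Bool.and_eq_true, Bool.not_eq_true', Bool.or_eq_false_iff,
      decide_eq_false_iff_not, not_lt, bne_eq_false_iff_eq, beq_iff_eq] at hv'
    obtain ⟨a, rfl⟩ : ∃ a : Int, p = 20 * a := ⟨p / 20, by omega⟩
    obtain ⟨b, rfl⟩ : ∃ b : Int, d = 20 * b := ⟨d / 20, by omega⟩
    obtain ⟨c, rfl⟩ : ∃ c : Int, f = 20 * c := ⟨f / 20, by omega⟩
    have ha : 0 ≤ a ∧ a ≤ 6 := by omega
    have hb : 0 ≤ b ∧ b ≤ 6 := by omega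
    have hc : c = 6 - a - b := by omega
    obtain ⟨ha0, ha6⟩ := ha
    obtain ⟨hb0, hb6⟩ := hb
    clear hv hv'
    interval_cases a <;> interval_cases b <;> subst hc <;> decide
  · -- invalid: (p,d,f) is in none of the tables, both sides give "Unknown outcome"
    have hne : ¬ ((p, d, f) = ((120 : Int), (0 : Int), (0 : Int))) := fun h => hv (pvTables_valid _ (Or.inl h))
    have h1 : pvScanA pvModuleTrailerA (p, d, f) = false := by
      rw [Bool.eq_false_iff]; intro h
      exact hv (pvTables_valid _ (Or.inr (Or.inl ((pvScanA_eq_mem _ _).1 h))))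
    have h2 : pvScanA pvModuleRetrieverA (p, d, f) = false := by
      rw [Bool.eq_false_iff]; intro h
      exact hv (pvTables_valid _ (Or.inr (Or.inr (Or.inl ((pvScanA_eq_mem _ _).1 h)))))
    have h3 : pvScanA pvExcludeA (p, d, f) = false := by
      rw [Bool.eq_false_iff]; intro h
      exact hv (pvTables_valid _ (Or.inr (Or.inr (Or.inr ((pvScanA_eq_mem _ _).1 h)))))
    have hvb : pvValidB p d f = false := Bool.eq_false_iff.2 hv
    have hne' : ((p, d, f) == ((120 : Int), (0 : Int), (0 : Int))) = false :=
      beq_eq_false_iff_ne.2 hne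
    rw [hne', h1, h2, h3, hvb]
    simp

-- ===== VERDICT (by name: the statement is the Claim_ definition above) =====
theorem progression_outcome_spec : Claim_equal_progression_outcome := by
  intro cv hDom hPre
  unfold Spec_progression_outcome progression_outcome progression_outcome_alt
  cases cv with
  | nil => exact absurd rfl hPre
  | cons x xs =>
    obtain ⟨p, d, f⟩ := x
    simpa [PySem.List.pyGet?, PySem.List.pyIdx?] using pvCore_eq p d f
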